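-- pv_equiv track=rewrite | github.com/Panacea2005/Genie | backend/ai_models/emotion_recognition_service.py | _categorize_emotion_for_mental_health
-- ===== SOURCE A (Python) =====
-- from typing import Dict, List, Tuple, Optional
--
-- def _categorize_emotion_for_mental_health(emotion: Optional[str]) -> str:
--     """
--     Categorize emotion for mental health context
--
--     Args:
--         emotion: Detected emotion
--
--     Returns:
--         Mental health category
--     """
--     if not emotion:
--         return "unknown"
--
--     emotion_lower = emotion.lower()
--
--     # Map emotions to mental health categories
--     if any(term in emotion_lower for term in ['sad', 'depression', 'grief', 'sorrow']):
--         return "depression_risk"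
--     elif any(term in emotion_lower for term in ['anxiety', 'fear', 'panic', 'worry']):
--         return "anxiety_risk"
--     elif any(term in emotion_lower for term in ['anger', 'rage', 'fury', 'irritation']):
--         return "anger_management"
--     elif any(term in emotion_lower for term in ['happy', 'joy', 'content', 'pleased']):
--         return "positive_mood"
--     elif any(term in emotion_lower for term in ['calm', 'relaxed', 'peaceful']):
--         return "stable_mood"
--     elif any(term in emotion_lower for term in ['stress', 'overwhelm', 'pressure']):
--         return "stress_response"
--     elif any(term in emotion_lower for term in ['neutral', 'normal']):
--         return "neutral_mood"
--     else:
--         return "other_emotion"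
-- ===== SOURCE B (Python) =====
-- _TABLE = [
--     ("depression_risk", ["sad", "depression", "grief", "sorrow"]),
--     ("anxiety_risk", ["anxiety", "fear", "panic", "worry"]),
--     ("anger_management", ["anger", "rage", "fury", "irritation"]),
--     ("positive_mood", ["happy", "joy", "content", "pleased"]),
--     ("stable_mood", ["calm", "relaxed", "peaceful"]),
--     ("stress_response", ["stress", "overwhelm", "pressure"]),
--     ("neutral_mood", ["neutral", "normal"]),
-- ]
-- _CATS = [cat for cat, _ in _TABLE]
-- # Inverted index: term -> priority (index of its category in _TABLE).
-- _TERM_PRIORITY = {term: p for p, (_, terms) in enumerate(_TABLE) for term in terms}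
-- _LENGTHS = sorted({len(t) for t in _TERM_PRIORITY})
--
--
-- def _categorize_emotion_for_mental_health(emotion):
--     # Single scan over the input's positions: at each position, hash-look-up the
--     # slices of the known term lengths and keep the minimum priority found.
--     if not emotion:
--         return "unknown"
--     s = emotion.lower()
--     best = len(_TABLE)
--     for i in range(len(s)):
--         for L in _LENGTHS:
--             p = _TERM_PRIORITY.get(s[i:i + L])
--             if p is not None and p < best:
--                 best = p
--     return _CATS[best] if best < len(_TABLE) else "other_emotion"
-- ===== Notes on version B (the rewrite author's own statement) =====
-- stated objective: alternative
-- what changed: Replaced the ordered if/elif chain of substring searches by an inverted index (term -> category priority dict): a single scan over the input's positions hash-looks-up the slices of the known term lengths and keeps the minimum priority, returning that category (or other_emotion).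
import Mathlib
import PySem

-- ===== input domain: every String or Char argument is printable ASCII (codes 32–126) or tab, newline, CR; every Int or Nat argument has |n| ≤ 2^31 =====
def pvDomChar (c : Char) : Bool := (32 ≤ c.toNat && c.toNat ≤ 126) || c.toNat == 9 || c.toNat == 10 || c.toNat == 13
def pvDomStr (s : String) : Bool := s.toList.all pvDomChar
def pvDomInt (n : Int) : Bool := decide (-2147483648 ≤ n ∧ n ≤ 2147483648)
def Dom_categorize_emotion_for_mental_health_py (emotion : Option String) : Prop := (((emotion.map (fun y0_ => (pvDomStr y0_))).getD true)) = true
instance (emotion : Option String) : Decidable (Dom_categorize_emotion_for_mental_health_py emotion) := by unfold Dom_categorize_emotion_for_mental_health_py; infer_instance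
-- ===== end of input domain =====

-- B replaces A's ordered if/elif chain of substring searches by an inverted index
-- (term -> category-priority dict) and a single scan over the input's positions
-- keeping the minimum priority found (alternative algorithm, same cost class).

-- ===== PORT A =====
def categorize_emotion_for_mental_health_py (emotion : Option String) : String :=
  match emotion with
  | none => "unknown"
  | some e =>
    if e = "" then "unknown"
    else
      let el := PySem.Str.lower e
      if (["sad", "depression", "grief", "sorrow"] : List String).any (fun t => PySem.Str.isIn t el) then "depression_risk"
      else if (["anxiety", "fear", "panic", "worry"] : List String).any (fun t => PySem.Str.isIn t el) then "anxiety_risk"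
      else if (["anger", "rage", "fury", "irritation"] : List String).any (fun t => PySem.Str.isIn t el) then "anger_management"
      else if (["happy", "joy", "content", "pleased"] : List String).any (fun t => PySem.Str.isIn t el) then "positive_mood"
      else if (["calm", "relaxed", "peaceful"] : List String).any (fun t => PySem.Str.isIn t el) then "stable_mood"
      else if (["stress", "overwhelm", "pressure"] : List String).any (fun t => PySem.Str.isIn t el) then "stress_response"
      else if (["neutral", "normal"] : List String).any (fun t => PySem.Str.isIn t el) then "neutral_mood"
      else "other_emotion"

-- ===== PORT B =====
-- the category names in priority order (_CATS in Source B)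
def pvCats : List String :=
  ["depression_risk", "anxiety_risk", "anger_management", "positive_mood",
   "stable_mood", "stress_response", "neutral_mood"]

-- the inverted index _TERM_PRIORITY: term -> index of its category (strings as char lists)
def pvTermPriority : PySem.Dict (List Char) Int := PySem.Dict.mk
  [("sad".toList, 0), ("depression".toList, 0), ("grief".toList, 0), ("sorrow".toList, 0),
   ("anxiety".toList, 1), ("fear".toList, 1), ("panic".toList, 1), ("worry".toList, 1),
   ("anger".toList, 2), ("rage".toList, 2), ("fury".toList, 2), ("irritation".toList, 2),
   ("happy".toList, 3), ("joy".toList, 3), ("content".toList, 3), ("pleased".toList, 3),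
   ("calm".toList, 4), ("relaxed".toList, 4), ("peaceful".toList, 4),
   ("stress".toList, 5), ("overwhelm".toList, 5), ("pressure".toList, 5),
   ("neutral".toList, 6), ("normal".toList, 6)]

-- _LENGTHS: the distinct term lengths, sorted
def pvLengths : List Int := [3, 4, 5, 6, 7, 8, 9, 10]

-- the inner 'for L in _LENGTHS' loop body of Source B
def pvInner (cs : List Char) (best : Int) (i : Int) : Int :=
  pvLengths.foldl (fun best L =>
    match pvTermPriority.get? (PySem.Chars.slice cs (some i) (some (i + L))) with
    | some p => if p < best then p else best
    | none => best) best

-- the outer 'for i in range(len(s))' loop of Source B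
def pvScan (cs : List Char) : Int :=
  (PySem.List.pyRange 0 cs.length 1).foldl (pvInner cs) 7

def categorize_emotion_for_mental_health_py_alt (emotion : Option String) : String :=
  match emotion with
  | none => "unknown"
  | some e =>
    if e = "" then "unknown"
    else
      let cs := (PySem.Str.lower e).toList
      let best := pvScan cs
      if best < 7 then (PySem.List.pyGet? pvCats best).getD "" else "other_emotion"

-- ===== PRECONDITION & SPEC =====
def Spec_categorize_emotion_for_mental_health_py (emotion : Option String) (out : String) : Prop := out = categorize_emotion_for_mental_health_py_alt emotion
instance (emotion : Option String) (out : String) : Decidable (Spec_categorize_emotion_for_mental_health_py emotion out) := by unfold Spec_categorize_emotion_for_mental_health_py; infer_instance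

-- ===== CLAIM (what is proved, stated in full; the proofs are below) =====
def Claim_equal_categorize_emotion_for_mental_health_py : Prop := ∀ (emotion : Option String), Dom_categorize_emotion_for_mental_health_py emotion → Spec_categorize_emotion_for_mental_health_py emotion (categorize_emotion_for_mental_health_py emotion)

-- ===== LEMMAS AND PROOFS =====

-- "some term of priority p occurs in cs"
def pvCond (cs : List Char) (p : Int) : Prop :=
  ∃ t, (t, p) ∈ pvTermPriority.items ∧ t <:+: cs

-- generic: the min-accumulating fold is ≤ j iff the start is, or some candidate is
theorem pvFoldMin_le_iff {β : Type} (f : β → Option Int) :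
    ∀ (l : List β) (b j : Int),
      l.foldl (fun best x =>
        match f x with
        | some p => if p < best then p else best
        | none => best) b ≤ j
      ↔ b ≤ j ∨ ∃ x ∈ l, ∃ p, f x = some p ∧ p ≤ j := by
  intro l
  induction l with
  | nil => intro b j; simp
  | cons x xs ih =>
    intro b j
    simp only [List.foldl_cons, ih]
    cases hx : f x with
    | none =>
      dsimp only
      constructor
      · rintro (h | ⟨y, hy, q, hq, hqj⟩)
        · exact Or.inl h
        · exact Or.inr ⟨y, List.mem_cons_of_mem _ hy, q, hq, hqj⟩
      · rintro (h | ⟨y, hy, q, hq, hqj⟩)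
        · exact Or.inl h
        · rcases List.mem_cons.mp hy with rfl | hy'
          · rw [hx] at hq; cases hq
          · exact Or.inr ⟨y, hy', q, hq, hqj⟩
    | some p =>
      dsimp only
      split_ifs with hp
      · constructor
        · rintro (h | ⟨y, hy, q, hq, hqj⟩)
          · exact Or.inr ⟨x, List.mem_cons_self .., p, hx, h⟩
          · exact Or.inr ⟨y, List.mem_cons_of_mem _ hy, q, hq, hqj⟩
        · rintro (h | ⟨y, hy, q, hq, hqj⟩)
          · exact Or.inl (by omega)
          · rcases List.mem_cons.mp hy with rfl | hy'
            · rw [hx] at hq; injection hq with hq; omega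
            · exact Or.inr ⟨y, hy', q, hq, hqj⟩
      · constructor
        · rintro (h | ⟨y, hy, q, hq, hqj⟩)
          · exact Or.inl h
          · exact Or.inr ⟨y, List.mem_cons_of_mem _ hy, q, hq, hqj⟩
        · rintro (h | ⟨y, hy, q, hq, hqj⟩)
          · exact Or.inl h
          · rcases List.mem_cons.mp hy with rfl | hy'
            · rw [hx] at hq; injection hq with hq; omega
            · exact Or.inr ⟨y, hy', q, hq, hqj⟩

theorem pvScan_foldl_le_iff (cs : List Char) :
    ∀ (l : List Int) (b j : Int),
      l.foldl (pvInner cs) b ≤ j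
      ↔ b ≤ j ∨ ∃ i ∈ l, ∃ L ∈ pvLengths, ∃ p,
          pvTermPriority.get? (PySem.Chars.slice cs (some i) (some (i + L))) = some p ∧ p ≤ j := by
  intro l
  induction l with
  | nil => intro b j; simp
  | cons x xs ih =>
    intro b j
    simp only [List.foldl_cons, ih]
    rw [show pvInner cs b x = pvLengths.foldl (fun best L =>
        match pvTermPriority.get? (PySem.Chars.slice cs (some x) (some (x + L))) with
        | some p => if p < best then p else best
        | none => best) b from rfl,
      pvFoldMin_le_iff (fun L => pvTermPriority.get? (PySem.Chars.slice cs (some x) (some (x + L))))]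
    constructor
    · rintro (⟨h | ⟨L, hL, p, hp, hpj⟩⟩ | ⟨i, hi, L, hL, p, hp, hpj⟩)
      · exact Or.inl h
      · exact Or.inr ⟨x, List.mem_cons_self .., L, hL, p, hp, hpj⟩
      · exact Or.inr ⟨i, List.mem_cons_of_mem _ hi, L, hL, p, hp, hpj⟩
    · rintro (h | ⟨i, hi, L, hL, p, hp, hpj⟩)
      · exact Or.inl (Or.inl h)
      · rcases List.mem_cons.mp hi with rfl | hi'
        · exact Or.inl (Or.inr ⟨L, hL, p, hp, hpj⟩)
        · exact Or.inr ⟨i, hi', L, hL, p, hp, hpj⟩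

-- kernel-checked facts about the literal inverted index
theorem pvDict_nodup : pvTermPriority.keys.Nodup := by decide

theorem pvDict_entry_facts :
    ∀ tp ∈ pvTermPriority.items,
      tp.1 ≠ [] ∧ (tp.1.length : Int) ∈ pvLengths ∧ 0 ≤ tp.2 ∧ tp.2 < 7 := by decide

-- slice hit → a term of that priority is an infix
theorem pvLengths_pos : ∀ L ∈ pvLengths, 0 < L := by decide

theorem pvHit_of_get (cs : List Char) (i L p : Int) (hi0 : 0 ≤ i) (hL : L ∈ pvLengths)
    (h : pvTermPriority.get? (PySem.Chars.slice cs (some i) (some (i + L))) = some p) :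
    pvCond cs p := by
  have hL0 : 0 < L := pvLengths_pos L hL
  have hmem := PySem.Dict.mem_items_of_get?_eq_some _ h
  refine ⟨PySem.Chars.slice cs (some i) (some (i + L)), hmem, ?_⟩
  rw [PySem.Chars.slice_eq_listSlice, PySem.List.slice_toNat _ hi0 (by omega)]
  exact (List.take_prefix _ _).isInfix.trans (List.drop_suffix _ _).isInfix

-- infix term → some in-range slice hits it in the dict
theorem pvGet_of_infix (cs : List Char) (t : List Char) (p : Int)
    (hmem : (t, p) ∈ pvTermPriority.items) (hinf : t <:+: cs) :
    ∃ i ∈ PySem.List.pyRange 0 cs.length 1, ∃ L ∈ pvLengths, ∃ q,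
      pvTermPriority.get? (PySem.Chars.slice cs (some i) (some (i + L))) = some q ∧ q = p := by
  obtain ⟨s₁, s₂, rfl⟩ := hinf
  obtain ⟨hne, hLenMem, -, -⟩ := pvDict_entry_facts _ hmem
  have htpos : 0 < t.length := List.length_pos_iff.mpr hne
  refine ⟨(s₁.length : Int), ?_, (t.length : Int), hLenMem, p, ?_, rfl⟩
  · rw [PySem.List.mem_pyRange_one]
    simp only [List.length_append]
    constructor
    · positivity
    · push_cast; omega
  · have hslice : PySem.Chars.slice (s₁ ++ t ++ s₂) (some (s₁.length : Int))
        (some ((s₁.length : Int) + (t.length : Int))) = t := by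
      rw [PySem.Chars.slice_eq_listSlice, PySem.List.slice_natCast_add]
      rw [List.append_assoc, List.drop_left, List.take_left]
    rw [hslice]
    exact (PySem.Dict.get?_eq_some_iff_mem_items _ _ _ pvDict_nodup).mpr hmem

-- the scan characterization in terms of pvCond
theorem pvScan_le_iff (cs : List Char) (j : Int) (hj : j < 7) :
    pvScan cs ≤ j ↔ ∃ p, p ≤ j ∧ pvCond cs p := by
  unfold pvScan
  rw [pvScan_foldl_le_iff]
  constructor
  · rintro (h | ⟨i, hi, L, hL, p, hp, hpj⟩)
    · omega
    · have hi0 : 0 ≤ i := (PySem.List.mem_pyRange_one.mp hi).1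
      exact ⟨p, hpj, pvHit_of_get cs i L p hi0 hL hp⟩
  · rintro ⟨p, hpj, t, hmem, hinf⟩
    obtain ⟨i, hi, L, hL, q, hq, rfl⟩ := pvGet_of_infix cs t p hmem hinf
    exact Or.inr ⟨i, hi, L, hL, q, hq, hpj⟩

theorem pvScan_nonneg (cs : List Char) : 0 ≤ pvScan cs := by
  by_contra h
  have h1 : pvScan cs ≤ -1 := by omega
  rw [pvScan_le_iff cs (-1) (by omega)] at h1
  obtain ⟨p, hpj, t, hmem, -⟩ := h1
  have := (pvDict_entry_facts _ hmem).2.2.1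
  omega

theorem pvScan_le_seven (cs : List Char) : pvScan cs ≤ 7 := by
  unfold pvScan
  rw [pvScan_foldl_le_iff]
  exact Or.inl le_rfl

-- pvCond p is exactly A's 'any' condition over the p-th term list
theorem pvCond_iff (el : String) (p : Int) (terms : List String)
    (hterms : ∀ t : List Char, (t, p) ∈ pvTermPriority.items ↔ t ∈ terms.map String.toList) :
    pvCond el.toList p ↔ (terms.any fun t => PySem.Str.isIn t el) = true := by
  unfold pvCond
  constructor
  · rintro ⟨t, hmem, hinf⟩
    obtain ⟨s, hs, rfl⟩ := List.mem_map.mp ((hterms t).mp hmem)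
    rw [List.any_eq_true]
    exact ⟨s, hs, (PySem.Str.isIn_iff_infix s el).mpr hinf⟩
  · intro h
    obtain ⟨s, hs, hin⟩ := List.any_eq_true.mp h
    exact ⟨s.toList, (hterms s.toList).mpr (List.mem_map_of_mem hs),
      (PySem.Str.isIn_iff_infix s el).mp hin⟩

theorem pvCond_bounds {cs : List Char} {p : Int} (h : pvCond cs p) : 0 ≤ p ∧ p < 7 := by
  obtain ⟨t, hmem, -⟩ := h
  exact ⟨(pvDict_entry_facts _ hmem).2.2.1, (pvDict_entry_facts _ hmem).2.2.2⟩

-- ===== VERDICT (by name: the statement is the Claim_ definition above) =====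
theorem categorize_emotion_for_mental_health_py_spec : Claim_equal_categorize_emotion_for_mental_health_py := by
  intro emotion _
  unfold Spec_categorize_emotion_for_mental_health_py
  cases emotion with
  | none => rfl
  | some e =>
    by_cases he : e = ""
    · simp [categorize_emotion_for_mental_health_py,
        categorize_emotion_for_mental_health_py_alt, he]
    · simp only [categorize_emotion_for_mental_health_py,
        categorize_emotion_for_mental_health_py_alt, if_neg he]
      set el := PySem.Str.lower e with hel
      have c0 := pvCond_iff el 0 ["sad", "depression", "grief", "sorrow"] (by
        intro t; simp [pvTermPriority])
      have c1 := pvCond_iff el 1 ["anxiety", "fear", "panic", "worry"] (by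
        intro t; simp [pvTermPriority])
      have c2 := pvCond_iff el 2 ["anger", "rage", "fury", "irritation"] (by
        intro t; simp [pvTermPriority])
      have c3 := pvCond_iff el 3 ["happy", "joy", "content", "pleased"] (by
        intro t; simp [pvTermPriority])
      have c4 := pvCond_iff el 4 ["calm", "relaxed", "peaceful"] (by
        intro t; simp [pvTermPriority])
      have c5 := pvCond_iff el 5 ["stress", "overwhelm", "pressure"] (by
        intro t; simp [pvTermPriority])
      have c6 := pvCond_iff el 6 ["neutral", "normal"] (by
        intro t; simp [pvTermPriority])
      by_cases b0 : ((["sad", "depression", "grief", "sorrow"] : List String).any fun t => PySem.Str.isIn t el) = true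
      · have h1 : pvScan el.toList ≤ 0 := (pvScan_le_iff _ 0 (by omega)).mpr ⟨0, le_rfl, c0.mpr b0⟩
        have hsc : pvScan el.toList = 0 := le_antisymm h1 (pvScan_nonneg _)
        rw [if_pos b0, hsc]
        decide
      by_cases b1 : ((["anxiety", "fear", "panic", "worry"] : List String).any fun t => PySem.Str.isIn t el) = true
      · have h1 : pvScan el.toList ≤ 1 := (pvScan_le_iff _ 1 (by omega)).mpr ⟨1, le_rfl, c1.mpr b1⟩
        have h2 : ¬ pvScan el.toList ≤ 0 := by
          intro h
          obtain ⟨p, hpk, hp⟩ := (pvScan_le_iff _ _ (by omega)).mp h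
          obtain ⟨hp0, -⟩ := pvCond_bounds hp
          interval_cases p
          exacts [b0 (c0.mp hp)]
        have hsc : pvScan el.toList = 1 := by omega
        rw [if_neg b0, if_pos b1, hsc]
        decide
      by_cases b2 : ((["anger", "rage", "fury", "irritation"] : List String).any fun t => PySem.Str.isIn t el) = true
      · have h1 : pvScan el.toList ≤ 2 := (pvScan_le_iff _ 2 (by omega)).mpr ⟨2, le_rfl, c2.mpr b2⟩
        have h2 : ¬ pvScan el.toList ≤ 1 := by
          intro h
          obtain ⟨p, hpk, hp⟩ := (pvScan_le_iff _ _ (by omega)).mp h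
          obtain ⟨hp0, -⟩ := pvCond_bounds hp
          interval_cases p
          exacts [b0 (c0.mp hp), b1 (c1.mp hp)]
        have hsc : pvScan el.toList = 2 := by omega
        rw [if_neg b0, if_neg b1, if_pos b2, hsc]
        decide
      by_cases b3 : ((["happy", "joy", "content", "pleased"] : List String).any fun t => PySem.Str.isIn t el) = true
      · have h1 : pvScan el.toList ≤ 3 := (pvScan_le_iff _ 3 (by omega)).mpr ⟨3, le_rfl, c3.mpr b3⟩
        have h2 : ¬ pvScan el.toList ≤ 2 := by
          intro h
          obtain ⟨p, hpk, hp⟩ := (pvScan_le_iff _ _ (by omega)).mp h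
          obtain ⟨hp0, -⟩ := pvCond_bounds hp
          interval_cases p
          exacts [b0 (c0.mp hp), b1 (c1.mp hp), b2 (c2.mp hp)]
        have hsc : pvScan el.toList = 3 := by omega
        rw [if_neg b0, if_neg b1, if_neg b2, if_pos b3, hsc]
        decide
      by_cases b4 : ((["calm", "relaxed", "peaceful"] : List String).any fun t => PySem.Str.isIn t el) = true
      · have h1 : pvScan el.toList ≤ 4 := (pvScan_le_iff _ 4 (by omega)).mpr ⟨4, le_rfl, c4.mpr b4⟩
        have h2 : ¬ pvScan el.toList ≤ 3 := by
          intro h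
          obtain ⟨p, hpk, hp⟩ := (pvScan_le_iff _ _ (by omega)).mp h
          obtain ⟨hp0, -⟩ := pvCond_bounds hp
          interval_cases p
          exacts [b0 (c0.mp hp), b1 (c1.mp hp), b2 (c2.mp hp), b3 (c3.mp hp)]
        have hsc : pvScan el.toList = 4 := by omega
        rw [if_neg b0, if_neg b1, if_neg b2, if_neg b3, if_pos b4, hsc]
        decide
      by_cases b5 : ((["stress", "overwhelm", "pressure"] : List String).any fun t => PySem.Str.isIn t el) = true
      · have h1 : pvScan el.toList ≤ 5 := (pvScan_le_iff _ 5 (by omega)).mpr ⟨5, le_rfl, c5.mpr b5⟩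
        have h2 : ¬ pvScan el.toList ≤ 4 := by
          intro h
          obtain ⟨p, hpk, hp⟩ := (pvScan_le_iff _ _ (by omega)).mp h
          obtain ⟨hp0, -⟩ := pvCond_bounds hp
          interval_cases p
          exacts [b0 (c0.mp hp), b1 (c1.mp hp), b2 (c2.mp hp), b3 (c3.mp hp), b4 (c4.mp hp)]
        have hsc : pvScan el.toList = 5 := by omega
        rw [if_neg b0, if_neg b1, if_neg b2, if_neg b3, if_neg b4, if_pos b5, hsc]
        decide
      by_cases b6 : ((["neutral", "normal"] : List String).any fun t => PySem.Str.isIn t el) = true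
      · have h1 : pvScan el.toList ≤ 6 := (pvScan_le_iff _ 6 (by omega)).mpr ⟨6, le_rfl, c6.mpr b6⟩
        have h2 : ¬ pvScan el.toList ≤ 5 := by
          intro h
          obtain ⟨p, hpk, hp⟩ := (pvScan_le_iff _ _ (by omega)).mp h
          obtain ⟨hp0, -⟩ := pvCond_bounds hp
          interval_cases p
          exacts [b0 (c0.mp hp), b1 (c1.mp hp), b2 (c2.mp hp), b3 (c3.mp hp), b4 (c4.mp hp), b5 (c5.mp hp)]
        have hsc : pvScan el.toList = 6 := by omega
        rw [if_neg b0, if_neg b1, if_neg b2, if_neg b3, if_neg b4, if_neg b5, if_pos b6, hsc]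
        decide
      · have h2 : ¬ pvScan el.toList ≤ 6 := by
          intro h
          obtain ⟨p, hpk, hp⟩ := (pvScan_le_iff _ _ (by omega)).mp h
          obtain ⟨hp0, -⟩ := pvCond_bounds hp
          interval_cases p
          exacts [b0 (c0.mp hp), b1 (c1.mp hp), b2 (c2.mp hp), b3 (c3.mp hp), b4 (c4.mp hp), b5 (c5.mp hp), b6 (c6.mp hp)]
        have hsc : pvScan el.toList = 7 := le_antisymm (pvScan_le_seven _) (by omega)
        rw [if_neg b0, if_neg b1, if_neg b2, if_neg b3, if_neg b4, if_neg b5, if_neg b6, hsc]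
        decide
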